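-- pv_equiv track=rewrite | github.com/benjaminingreens/org | src/org/tidy.py | check_multiple_occurrence
-- ===== SOURCE A (Python) =====
-- def check_multiple_occurrence(tags, tagsets):
--
--     item_keys = set()
--
--     # build up a set of all the groups associated
--     # with the tags
--     for group, group_tags in tagsets.items():
--         for tag in tags:
--             if tag in group_tags:
--                 item_keys.add(group)
--
--     # if multiple groups are associated with the tags
--     if len(item_keys) > 1:
--
--         # get the group the very first tage is associated with
--         # REVIEW: rather, get the group the first tag ASSOCIATED
--         # WITH A GROUP is associated with - avoids None groups
--         # I think this is already happening
--         first_group = None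
--         for tag in tags:
--             for group, group_tags in tagsets.items():
--                 if tag in group_tags:
--                     first_group = group
--                     break
--         return first_group
--
--     # if exactly one group
--     elif len(item_keys) == 1:
--         group = next(iter(item_keys))
--         return group
--
--     # if no groups
--     else:
--         return None
-- ===== SOURCE B (Python) =====
-- def check_multiple_occurrence(tags, tagsets):
--     # One pass over tags: collect all matching groups and track the
--     # first matching group of the last tag that matched anything.
--     item_keys = set()
--     first_group = None
--     for tag in tags:
--         matched = None
--         for group, group_tags in tagsets.items():
--             if tag in group_tags:
--                 item_keys.add(group)
--                 if matched is None:
--                     matched = group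
--         if matched is not None:
--             first_group = matched
--     if len(item_keys) > 1:
--         return first_group
--     elif len(item_keys) == 1:
--         return next(iter(item_keys))
--     else:
--         return None
-- ===== Notes on version B (the rewrite author's own statement) =====
-- stated objective: alternative
-- what changed: A makes two separate nested scans (tagsets-outer to build the group set, then tags-outer with break to find the last-matching tag's first group); B fuses everything into a single pass over tags whose inner tagsets loop simultaneously collects matching groups and captures the first match, so the decision data is ready after one traversal.
import Mathlib
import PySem

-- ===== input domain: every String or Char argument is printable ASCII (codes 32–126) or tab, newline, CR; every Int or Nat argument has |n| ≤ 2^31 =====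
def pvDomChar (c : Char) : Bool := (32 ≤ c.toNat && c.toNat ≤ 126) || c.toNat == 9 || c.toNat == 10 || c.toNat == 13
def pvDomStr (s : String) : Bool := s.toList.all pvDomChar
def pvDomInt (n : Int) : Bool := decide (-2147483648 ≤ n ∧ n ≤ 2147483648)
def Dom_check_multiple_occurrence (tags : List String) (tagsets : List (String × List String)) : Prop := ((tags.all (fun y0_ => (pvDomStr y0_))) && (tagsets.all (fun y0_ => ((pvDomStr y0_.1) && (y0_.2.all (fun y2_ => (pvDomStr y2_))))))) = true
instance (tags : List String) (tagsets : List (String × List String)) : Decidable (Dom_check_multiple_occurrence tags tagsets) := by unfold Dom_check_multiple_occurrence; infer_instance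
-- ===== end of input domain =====

-- B fuses A's two separate nested scans into one pass over tags (objective: alternative decomposition, same cost).

-- ===== PORT A =====
-- inner 'for group, group_tags in tagsets.items(): if tag in group_tags: first_group = group; break'
def cmoFirstMatch (tag : String) (tagsets : List (String × List String)) : Option String :=
  match tagsets with
  | [] => none
  | p :: rest => if tag ∈ p.2 then some p.1 else cmoFirstMatch tag rest

def check_multiple_occurrence (tags : List String) (tagsets : List (String × List String)) : Option String :=
  -- phase 1: build item_keys by scanning tagsets, then tags
  let item_keys : PySem.Set String :=
    tagsets.foldl (fun s p => tags.foldl (fun s tag => if tag ∈ p.2 then PySem.Set.add s p.1 else s) s) PySem.Set.empty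
  if 1 < item_keys.length then
    -- phase 2: separate scan over tags, inner loop with break
    tags.foldl (fun fg tag => match cmoFirstMatch tag tagsets with | some g => some g | none => fg) none
  else if item_keys.length = 1 then
    item_keys.head?          -- next(iter(item_keys)): the unique element
  else
    none

-- ===== PORT B =====
def check_multiple_occurrence_alt (tags : List String) (tagsets : List (String × List String)) : Option String :=
  -- single pass over tags; state = (item_keys, first_group)
  let st : PySem.Set String × Option String :=
    tags.foldl (fun st tag =>
      let inner : PySem.Set String × Option String :=
        tagsets.foldl (fun q p =>
          if tag ∈ p.2 then
            (PySem.Set.add q.1 p.1, match q.2 with | none => some p.1 | some g => some g)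
          else q) (st.1, none)
      (inner.1, match inner.2 with | none => st.2 | some g => some g)) (PySem.Set.empty, none)
  if 1 < st.1.length then st.2
  else if st.1.length = 1 then st.1.head?
  else none

-- ===== PRECONDITION & SPEC =====
def Spec_check_multiple_occurrence (tags : List String) (tagsets : List (String × List String)) (out : Option String) : Prop := out = check_multiple_occurrence_alt tags tagsets
instance (tags : List String) (tagsets : List (String × List String)) (out : Option String) : Decidable (Spec_check_multiple_occurrence tags tagsets out) := by unfold Spec_check_multiple_occurrence; infer_instance

-- ===== CLAIM (what is proved, stated in full; the proofs are below) =====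
def Claim_equal_check_multiple_occurrence : Prop := ∀ (tags : List String) (tagsets : List (String × List String)), Dom_check_multiple_occurrence tags tagsets → Spec_check_multiple_occurrence tags tagsets (check_multiple_occurrence tags tagsets)

-- ===== LEMMAS AND PROOFS =====

-- membership through a conditional-add fold over tagsets
lemma cmo_mem_addIf (c : String × List String → Prop) [DecidablePred c]
    (tagsets : List (String × List String)) (s : PySem.Set String) (x : String) :
    x ∈ tagsets.foldl (fun s p => if c p then PySem.Set.add s p.1 else s) s
      ↔ x ∈ s ∨ ∃ p ∈ tagsets, c p ∧ p.1 = x := by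
  induction tagsets generalizing s with
  | nil => simp
  | cons p rest ih =>
    by_cases h : c p
    · simp only [List.foldl_cons, if_pos h, ih, PySem.Set.mem_add]
      constructor
      · rintro (⟨hx | rfl⟩ | ⟨q, hq, hcq, rfl⟩)
        · exact Or.inl hx
        · exact Or.inr ⟨p, by simp, h, rfl⟩
        · exact Or.inr ⟨q, by simp [hq], hcq, rfl⟩
      · rintro (hx | ⟨q, hq, hcq, rfl⟩)
        · exact Or.inl (Or.inl hx)
        · rcases List.mem_cons.mp hq with rfl | hq
          · exact Or.inl (Or.inr rfl)
          · exact Or.inr ⟨q, hq, hcq, rfl⟩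
    · simp only [List.foldl_cons, if_neg h, ih]
      constructor
      · rintro (hx | ⟨q, hq, hcq, rfl⟩)
        · exact Or.inl hx
        · exact Or.inr ⟨q, by simp [hq], hcq, rfl⟩
      · rintro (hx | ⟨q, hq, hcq, rfl⟩)
        · exact Or.inl hx
        · rcases List.mem_cons.mp hq with rfl | hq
          · exact absurd hcq h
          · exact Or.inr ⟨q, hq, hcq, rfl⟩

-- nodup through a conditional-add fold
lemma cmo_nodup_addIf (c : String × List String → Prop) [DecidablePred c]
    (tagsets : List (String × List String)) (s : PySem.Set String) (hs : s.Nodup) :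
    (tagsets.foldl (fun s p => if c p then PySem.Set.add s p.1 else s) s).Nodup := by
  induction tagsets generalizing s with
  | nil => simpa
  | cons p rest ih =>
    simp only [List.foldl_cons]
    apply ih
    split
    · exact PySem.Set.nodup_add _ _ hs
    · exact hs

-- A's inner fold over tags collapses to a single conditional add
lemma cmo_innerA (tags : List String) (gts : List String) (g : String) (s : PySem.Set String) :
    tags.foldl (fun s tag => if tag ∈ gts then PySem.Set.add s g else s) s
      = if (∃ t ∈ tags, t ∈ gts) then PySem.Set.add s g else s := by
  induction tags generalizing s with
  | nil => simp
  | cons t ts ih =>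
    by_cases h : t ∈ gts
    · simp only [List.foldl_cons, if_pos h, ih]
      have hidem : PySem.Set.add (PySem.Set.add s g) g = PySem.Set.add s g :=
        PySem.Set.add_of_mem ((PySem.Set.mem_add s g g).mpr (Or.inr rfl))
      by_cases h2 : (∃ t ∈ ts, t ∈ gts)
      · rw [if_pos h2, if_pos (by exact ⟨t, by simp, h⟩), hidem]
      · simp [h, h2]
    · simp only [List.foldl_cons, if_neg h, ih]
      by_cases h2 : (∃ t ∈ ts, t ∈ gts) <;> simp [h, h2]

-- B's inner fold over tagsets: splits into the set part and the first-match part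
lemma cmo_innerB (tag : String) (tagsets : List (String × List String))
    (s : PySem.Set String) (o : Option String) :
    tagsets.foldl (fun q p =>
        if tag ∈ p.2 then
          (PySem.Set.add q.1 p.1, match q.2 with | none => some p.1 | some g => some g)
        else q) (s, o)
      = (tagsets.foldl (fun s p => if tag ∈ p.2 then PySem.Set.add s p.1 else s) s,
         match o with | none => cmoFirstMatch tag tagsets | some g => some g) := by
  induction tagsets generalizing s o with
  | nil => cases o <;> simp [cmoFirstMatch]
  | cons p rest ih =>
    by_cases h : tag ∈ p.2
    · cases o <;> simp [h, ih, cmoFirstMatch]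
    · cases o <;> simp [h, ih, cmoFirstMatch]

-- a pair fold whose components do not interact splits into two folds
lemma cmo_pairfold (tags : List String) (f : PySem.Set String → String → PySem.Set String)
    (g : String → Option String) (s : PySem.Set String) (o : Option String) :
    tags.foldl (fun st tag => (f st.1 tag, match g tag with | none => st.2 | some x => some x)) (s, o)
      = (tags.foldl f s,
         tags.foldl (fun fg tag => match g tag with | some x => some x | none => fg) o) := by
  induction tags generalizing s o with
  | nil => simp
  | cons t ts ih =>
    simp only [List.foldl_cons, ih]
    cases g t <;> simp

-- B's outer fold in split form
lemma cmo_B_state (tags : List String) (tagsets : List (String × List String))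
    (s : PySem.Set String) (o : Option String) :
    tags.foldl (fun st tag =>
      let inner : PySem.Set String × Option String :=
        tagsets.foldl (fun q p =>
          if tag ∈ p.2 then
            (PySem.Set.add q.1 p.1, match q.2 with | none => some p.1 | some g => some g)
          else q) (st.1, none)
      (inner.1, match inner.2 with | none => st.2 | some g => some g)) (s, o)
      = (tags.foldl (fun s tag => tagsets.foldl (fun s p => if tag ∈ p.2 then PySem.Set.add s p.1 else s) s) s,
         tags.foldl (fun fg tag => match cmoFirstMatch tag tagsets with | some g => some g | none => fg) o) := by
  have hf : (fun (st : PySem.Set String × Option String) tag =>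
      let inner : PySem.Set String × Option String :=
        tagsets.foldl (fun q p =>
          if tag ∈ p.2 then
            (PySem.Set.add q.1 p.1, match q.2 with | none => some p.1 | some g => some g)
          else q) (st.1, none)
      (inner.1, match inner.2 with | none => st.2 | some g => some g))
      = fun (st : PySem.Set String × Option String) tag =>
          (tagsets.foldl (fun s p => if tag ∈ p.2 then PySem.Set.add s p.1 else s) st.1,
           match cmoFirstMatch tag tagsets with | none => st.2 | some g => some g) := by
    funext st tag
    simp only [cmo_innerB]
  rw [hf]
  exact cmo_pairfold tags (fun s tag => tagsets.foldl (fun s p => if tag ∈ p.2 then PySem.Set.add s p.1 else s) s) (fun tag => cmoFirstMatch tag tagsets) s o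

-- membership in A's item_keys
lemma cmo_memA (tags : List String) (tagsets : List (String × List String)) (x : String) :
    x ∈ tagsets.foldl (fun s p => tags.foldl (fun s tag => if tag ∈ p.2 then PySem.Set.add s p.1 else s) s) (PySem.Set.empty : PySem.Set String)
      ↔ ∃ p ∈ tagsets, p.1 = x ∧ ∃ t ∈ tags, t ∈ p.2 := by
  have hf : (fun (s : PySem.Set String) (p : String × List String) =>
        tags.foldl (fun s tag => if tag ∈ p.2 then PySem.Set.add s p.1 else s) s)
      = fun s p => if (∃ t ∈ tags, t ∈ p.2) then PySem.Set.add s p.1 else s := by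
    funext s p; exact cmo_innerA tags p.2 p.1 s
  rw [hf, cmo_mem_addIf (fun p => ∃ t ∈ tags, t ∈ p.2)]
  simp [PySem.Set.empty]

-- membership in B's set
lemma cmo_memB (tags : List String) (tagsets : List (String × List String)) (x : String) :
    x ∈ tags.foldl (fun s tag => tagsets.foldl (fun s p => if tag ∈ p.2 then PySem.Set.add s p.1 else s) s) (PySem.Set.empty : PySem.Set String)
      ↔ ∃ t ∈ tags, ∃ p ∈ tagsets, p.1 = x ∧ t ∈ p.2 := by
  have key : ∀ (s : PySem.Set String),
      x ∈ tags.foldl (fun s tag => tagsets.foldl (fun s p => if tag ∈ p.2 then PySem.Set.add s p.1 else s) s) s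
        ↔ x ∈ s ∨ ∃ t ∈ tags, ∃ p ∈ tagsets, p.1 = x ∧ t ∈ p.2 := by
    induction tags with
    | nil => simp
    | cons t ts ih =>
      intro s
      simp only [List.foldl_cons, ih, cmo_mem_addIf (fun p => t ∈ p.2)]
      constructor
      · rintro (⟨hx | ⟨p, hp, hpt, rfl⟩⟩ | ⟨u, hu, p, hp, rfl, hup⟩)
        · exact Or.inl hx
        · exact Or.inr ⟨t, by simp, p, hp, rfl, hpt⟩
        · exact Or.inr ⟨u, by simp [hu], p, hp, rfl, hup⟩
      · rintro (hx | ⟨u, hu, p, hp, rfl, hup⟩)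
        · exact Or.inl (Or.inl hx)
        · rcases List.mem_cons.mp hu with rfl | hu
          · exact Or.inl (Or.inr ⟨p, hp, hup, rfl⟩)
          · exact Or.inr ⟨u, hu, p, hp, rfl, hup⟩
  rw [key]
  simp [PySem.Set.empty]

-- nodup of B's set
lemma cmo_nodupB (tags : List String) (tagsets : List (String × List String))
    (s : PySem.Set String) (hs : s.Nodup) :
    (tags.foldl (fun s tag => tagsets.foldl (fun s p => if tag ∈ p.2 then PySem.Set.add s p.1 else s) s) s).Nodup := by
  induction tags generalizing s with
  | nil => simpa
  | cons t ts ih =>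
    simp only [List.foldl_cons]
    exact ih _ (cmo_nodup_addIf (fun p => t ∈ p.2) tagsets s hs)

-- the two sets are permutations of each other
lemma cmo_perm (tags : List String) (tagsets : List (String × List String)) :
    (tagsets.foldl (fun s p => tags.foldl (fun s tag => if tag ∈ p.2 then PySem.Set.add s p.1 else s) s) (PySem.Set.empty : PySem.Set String)).Perm
      (tags.foldl (fun s tag => tagsets.foldl (fun s p => if tag ∈ p.2 then PySem.Set.add s p.1 else s) s) (PySem.Set.empty : PySem.Set String)) := by
  have hA : ((fun (s : PySem.Set String) (p : String × List String) =>
        tags.foldl (fun s tag => if tag ∈ p.2 then PySem.Set.add s p.1 else s) s))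
      = fun s p => if (∃ t ∈ tags, t ∈ p.2) then PySem.Set.add s p.1 else s := by
    funext s p; exact cmo_innerA tags p.2 p.1 s
  have hnA : (tagsets.foldl (fun s p => tags.foldl (fun s tag => if tag ∈ p.2 then PySem.Set.add s p.1 else s) s) (PySem.Set.empty : PySem.Set String)).Nodup := by
    rw [hA]; exact cmo_nodup_addIf _ tagsets _ (by simp [PySem.Set.empty])
  rw [List.perm_ext_iff_of_nodup hnA (cmo_nodupB tags tagsets _ (by simp [PySem.Set.empty]))]
  intro x
  rw [cmo_memA, cmo_memB]
  constructor
  · rintro ⟨p, hp, rfl, t, ht, htp⟩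
    exact ⟨t, ht, p, hp, rfl, htp⟩
  · rintro ⟨t, ht, p, hp, rfl, htp⟩
    exact ⟨p, hp, rfl, t, ht, htp⟩

-- ===== VERDICT (by name: the statement is the Claim_ definition above) =====
theorem check_multiple_occurrence_spec : Claim_equal_check_multiple_occurrence := by
  intro tags tagsets _
  unfold Spec_check_multiple_occurrence check_multiple_occurrence check_multiple_occurrence_alt
  rw [cmo_B_state]
  have hperm := cmo_perm tags tagsets
  have hlen := hperm.length_eq
  simp only [hlen]
  split
  · rfl
  · split
    · rename_i h1 h2
      set SA := tagsets.foldl (fun s p => tags.foldl (fun s tag => if tag ∈ p.2 then PySem.Set.add s p.1 else s) s) (PySem.Set.empty : PySem.Set String) with hSA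
      set SB := tags.foldl (fun s tag => tagsets.foldl (fun s p => if tag ∈ p.2 then PySem.Set.add s p.1 else s) s) (PySem.Set.empty : PySem.Set String) with hSB
      obtain ⟨b, hb⟩ := List.length_eq_one_iff.mp h2
      obtain ⟨a, ha⟩ := List.length_eq_one_iff.mp (hlen.trans h2)
      have hab : a = b := by
        have hm : a ∈ SB := hperm.mem_iff.mp (by rw [ha]; simp)
        rw [hb] at hm; simpa using hm
      rw [ha, hb, hab]
    · rfl
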